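-- pv_equiv track=rewrite | github.com/Meliowant/advent_of_code | year2020/day07/conftest.py | build_dependencies_up
-- ===== SOURCE A (Python) =====
-- def build_dependencies_up(source={}, target=""):
--     outer_bags = []
--     added_more = True
--     for outer, inner in source.items():
--         if target in inner.keys():
--             outer_bags.append([target, outer])
--
--     while added_more:
--         added_more = False
--         new_outer = []
--         for bag_list in outer_bags:
--             last_bag = bag_list[-1]
--             last_bag_found = False
--
--             for outer_bag, inner_bags in source.items():
--                 if last_bag in inner_bags.keys():
--                     last_bag_found = True
--                     new_list = list(bag_list)
--                     new_list.append(outer_bag)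
--                     new_outer.append(new_list)
--                     added_more = True
--
--             if last_bag_found is False:
--                 new_outer.append(bag_list)
--
--         if new_outer:
--             outer_bags = list(new_outer)
--
--     return outer_bags
-- ===== SOURCE B (Python) =====
-- def build_dependencies_up(source={}, target=""):
--     # Reverse adjacency: inner bag -> outer bags that directly contain it, in source order.
--     parents = {}
--     for outer, inner in source.items():
--         for bag in inner:
--             parents.setdefault(bag, []).append(outer)
--
--     def extend(path):
--         succ = parents.get(path[-1], [])
--         if not succ:
--             return [path]
--         res = []
--         for o in succ:
--             res.extend(extend(path + [o]))
--         return res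
--
--     result = []
--     for o in parents.get(target, []):
--         result.extend(extend([target, o]))
--     return result
-- ===== Notes on version B (the rewrite author's own statement) =====
-- stated objective: alternative
-- what changed: B builds a reverse adjacency map (inner bag -> containing outer bags) once and extends paths by direct dictionary lookups in a depth-first recursion, instead of A's round-by-round rescan of the whole source for every live path.
import Mathlib
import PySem

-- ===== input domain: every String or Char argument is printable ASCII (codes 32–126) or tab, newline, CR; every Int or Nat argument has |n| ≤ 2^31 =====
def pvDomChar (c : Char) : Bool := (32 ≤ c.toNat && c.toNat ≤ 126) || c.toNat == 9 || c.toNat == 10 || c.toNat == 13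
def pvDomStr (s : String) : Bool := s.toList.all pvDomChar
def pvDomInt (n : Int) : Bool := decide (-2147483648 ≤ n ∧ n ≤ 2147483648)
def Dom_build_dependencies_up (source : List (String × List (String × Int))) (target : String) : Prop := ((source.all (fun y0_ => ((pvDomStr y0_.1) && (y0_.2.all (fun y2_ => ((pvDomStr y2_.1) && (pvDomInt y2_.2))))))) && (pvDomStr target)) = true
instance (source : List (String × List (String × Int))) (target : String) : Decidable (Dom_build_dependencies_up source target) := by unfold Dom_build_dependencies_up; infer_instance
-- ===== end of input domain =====

-- B replaces A's repeated whole-source rescans per path per round with one reverse-adjacency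
-- map (inner bag -> containing bags) built once, then extends paths by direct lookups (DFS);
-- a different algorithm of comparable measured cost — see claim.json.

-- ===== PORT A =====
-- bag_list[-1]; every path A and B build is nonempty, so Python never raises here
def pvLastBag (p : List String) : String := (PySem.List.pyGet? p (-1)).getD ""

-- the inner 'for outer_bag, inner_bags in source.items()' scan of A; state = (new_outer, last_bag_found, added_more)
def pvInnerScanA (source : List (String × List (String × Int))) (bag_list : List String)
    (last_bag : String) (st : List (List String) × Bool × Bool) : List (List String) × Bool × Bool :=
  source.foldl (fun st pr =>
    if (pr.2.map Prod.fst).contains last_bag then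
      (st.1 ++ [bag_list ++ [pr.1]], true, true)
    else st) st

-- one iteration of A's while-loop body: returns (new_outer, added_more)
def pvStepA (source : List (String × List (String × Int))) (L : List (List String)) :
    List (List String) × Bool :=
  L.foldl (fun acc bag_list =>
    let st := pvInnerScanA source bag_list (pvLastBag bag_list) (acc.1, false, acc.2)
    (if st.2.1 = false then st.1 ++ [bag_list] else st.1, st.2.2)) ([], false)

-- A's 'while added_more' loop; the Nat fuel only makes the recursion structural
-- (under Pre_ it is never exhausted: see the proofs below)
def pvLoopA (source : List (String × List (String × Int))) :
    Nat → List (List String) → List (List String)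
  | 0, L => L
  | f + 1, L =>
    let st := pvStepA source L
    let L' := if st.1.isEmpty then L else st.1
    if st.2 then pvLoopA source f L' else L'

def build_dependencies_up (source : List (String × List (String × Int))) (target : String) : List (List String) :=
  let outer_bags := source.foldl
    (fun acc pr => if (pr.2.map Prod.fst).contains target then acc ++ [[target, pr.1]] else acc) []
  pvLoopA source (source.length + 1) outer_bags

-- ===== PORT B =====
-- parents.setdefault(bag, []).append(outer) over each inner dict's (deduplicated) keys
def pvParents (source : List (String × List (String × Int))) : PySem.Dict String (List String) :=
  source.foldl (fun d pr =>
    (PySem.List.dedup (pr.2.map Prod.fst)).foldl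
      (fun d bag => d.modify bag [] (· ++ [pr.1])) d)
    PySem.Dict.empty

-- B's recursive 'extend'; the Nat fuel only makes the recursion structural
-- (under Pre_ it is never exhausted: see the proofs below)
def pvDfs (parents : PySem.Dict String (List String)) : Nat → List String → List (List String)
  | 0, _ => []
  | f + 1, path =>
    let succ := parents.getD (pvLastBag path) []
    if succ.isEmpty then [path]
    else succ.foldl (fun acc o => acc ++ pvDfs parents f (path ++ [o])) []

def build_dependencies_up_alt (source : List (String × List (String × Int))) (target : String) : List (List String) :=
  let parents := pvParents source
  (parents.getD target []).foldl
    (fun acc o => acc ++ pvDfs parents (source.length + 1) [target, o]) []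

-- ===== PRECONDITION & SPEC =====
-- the direct containers of bag b, in source order
def pvSuccs (source : List (String × List (String × Int))) (b : String) : List String :=
  (source.filter (fun pr => (pr.2.map Prod.fst).contains b)).map Prod.fst

-- 'a is transitively contained in b within 1..f containment steps'
def pvReach (source : List (String × List (String × Int))) :
    Nat → String → String → Bool
  | 0, _, _ => false
  | f + 1, a, b =>
    (pvSuccs source a).contains b ||
      (pvSuccs source a).any (fun c => pvReach source f c b)

-- Pre_ requires (1) distinct outer keys — duplicate keys are collapsed by a Python dict, so an
-- association list with duplicates has no Python-dict counterpart — and (2) that no bag on an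
-- upward containment path from the target lies on a containment cycle (self-containment is
-- checked to depth length+1, which suffices: any cycle revisits some bag within that many
-- steps): exactly on such sources Python A loops forever (and B's recursion never returns).
def Pre_build_dependencies_up (source : List (String × List (String × Int))) (target : String) : Prop :=
  (source.map Prod.fst).Nodup ∧
  ∀ k ∈ source.map Prod.fst,
    pvReach source (source.length + 1) target k = true →
    pvReach source (source.length + 1) k k = false
instance (source : List (String × List (String × Int))) (target : String) : Decidable (Pre_build_dependencies_up source target) := by unfold Pre_build_dependencies_up; infer_instance

def pvWitness_build_dependencies_up : (List (String × List (String × Int))) × String :=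
  ([("g", [("r", 1)]), ("w", [("g", 2)])], "r")

def Spec_build_dependencies_up (source : List (String × List (String × Int))) (target : String) (out : List (List String)) : Prop := out = build_dependencies_up_alt source target
instance (source : List (String × List (String × Int))) (target : String) (out : List (List String)) : Decidable (Spec_build_dependencies_up source target out) := by unfold Spec_build_dependencies_up; infer_instance

-- ===== CLAIM (what is proved, stated in full; the proofs are below) =====
def Claim_equal_build_dependencies_up : Prop := ∀ (source : List (String × List (String × Int))) (target : String), Dom_build_dependencies_up source target → Pre_build_dependencies_up source target → Spec_build_dependencies_up source target (build_dependencies_up source target)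

-- ===== LEMMAS AND PROOFS =====

theorem mem_pvSuccs (source : List (String × List (String × Int))) {b o : String}
    (ho : o ∈ pvSuccs source b) :
    ∃ pr ∈ source, pr.1 = o ∧ (pr.2.map Prod.fst).contains b = true := by
  unfold pvSuccs at ho
  obtain ⟨pr, hpr, rfl⟩ := List.mem_map.1 ho
  exact ⟨pr, (List.mem_filter.1 hpr).1, rfl, (List.mem_filter.1 hpr).2⟩

theorem pvSuccs_mem_keys (source : List (String × List (String × Int))) {b o : String}
    (ho : o ∈ pvSuccs source b) : o ∈ source.map Prod.fst := by
  obtain ⟨pr, hmem, rfl, _⟩ := mem_pvSuccs source ho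
  exact List.mem_map.2 ⟨pr, hmem, rfl⟩

theorem pvLastBag_append (p : List String) (o : String) : pvLastBag (p ++ [o]) = o := by
  unfold pvLastBag
  have h : PySem.List.pyGet? (p ++ [o]) (-1) = some o := by
    induction p with
    | nil => rfl
    | cons x t _ => simp [PySem.List.pyGet?, PySem.List.pyIdx?, List.length_append]
  rw [h]
  rfl

-- ----- reachability facts -----

theorem pvReach_mono (source : List (String × List (String × Int))) :
    ∀ {f g : Nat} {a b : String}, f ≤ g → pvReach source f a b = true →
      pvReach source g a b = true := by
  intro f
  induction f with
  | zero => intro g a b _ h; exact absurd h (by simp [pvReach])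
  | succ f ih =>
    intro g a b hfg h
    match g, hfg with
    | g + 1, hfg =>
      unfold pvReach at h ⊢
      rcases Bool.or_eq_true_iff.1 h with h1 | h2
      · exact Bool.or_eq_true_iff.2 (Or.inl h1)
      · obtain ⟨c, hc, hr⟩ := List.any_eq_true.1 h2
        exact Bool.or_eq_true_iff.2 (Or.inr (List.any_eq_true.2
          ⟨c, hc, ih (Nat.succ_le_succ_iff.1 hfg) hr⟩))

theorem pvReach_snoc (source : List (String × List (String × Int))) :
    ∀ {f : Nat} {a b c : String}, pvReach source f a b = true → c ∈ pvSuccs source b →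
      pvReach source (f + 1) a c = true := by
  intro f
  induction f with
  | zero => intro a b c h _; exact absurd h (by simp [pvReach])
  | succ f ih =>
    intro a b c h hc
    unfold pvReach at h
    show pvReach source (f + 1 + 1) a c = true
    unfold pvReach
    rcases Bool.or_eq_true_iff.1 h with h1 | h2
    · -- one step a → b, then b → c
      have hb : b ∈ pvSuccs source a := List.contains_iff_mem.1 h1
      have h1' : pvReach source (f + 1) b c = true := by
        unfold pvReach
        exact Bool.or_eq_true_iff.2 (Or.inl (List.contains_iff_mem.2 hc))
      exact Bool.or_eq_true_iff.2 (Or.inr (List.any_eq_true.2 ⟨b, hb, h1'⟩))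
    · obtain ⟨d, hd, hr⟩ := List.any_eq_true.1 h2
      exact Bool.or_eq_true_iff.2 (Or.inr (List.any_eq_true.2 ⟨d, hd, ih hr hc⟩))

theorem pvReach_of_chain (source : List (String × List (String × Int))) :
    ∀ (v : List String) (a x : String),
      List.IsChain (fun a b => b ∈ pvSuccs source a) (a :: (v ++ [x])) →
      pvReach source (v.length + 1) a x = true := by
  intro v
  induction v with
  | nil =>
    intro a x h
    have hax : x ∈ pvSuccs source a := (List.isChain_cons_cons.1 h).1
    unfold pvReach
    exact Bool.or_eq_true_iff.2 (Or.inl (List.contains_iff_mem.2 hax))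
  | cons b v ih =>
    intro a x h
    rw [List.cons_append] at h
    have hab : b ∈ pvSuccs source a := (List.isChain_cons_cons.1 h).1
    have htl : List.IsChain (fun a b => b ∈ pvSuccs source a) (b :: (v ++ [x])) :=
      (List.isChain_cons_cons.1 h).2
    show pvReach source (v.length + 1 + 1) a x = true
    unfold pvReach
    exact Bool.or_eq_true_iff.2 (Or.inr (List.any_eq_true.2 ⟨b, hab, ih b x htl⟩))

-- ----- the path invariant maintained by both A's rounds and B's DFS -----

def pvInv (source : List (String × List (String × Int))) (target : String)
    (p : List String) : Prop :=
  p ≠ [] ∧ p.head? = some target ∧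
  List.IsChain (fun a b => b ∈ pvSuccs source a) p ∧ p.Nodup ∧
  ∀ x ∈ p.tail, x ∈ source.map Prod.fst

theorem pvInv_init (source : List (String × List (String × Int))) (target : String) :
    pvInv source target [target] :=
  ⟨List.cons_ne_nil _ _, rfl, List.isChain_singleton _, List.nodup_singleton _, by simp⟩

theorem pvLen (source : List (String × List (String × Int))) (target : String)
    {p : List String} (h : pvInv source target p) : p.length ≤ source.length + 1 := by
  obtain ⟨hne, hh, _, hnd, htl⟩ := h
  match p, hh with
  | a :: tl, hh =>
    have ha : a = target := by simpa using hh
    subst ha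
    have hsub : (a :: tl) ⊆ a :: source.map Prod.fst := by
      intro x hx
      rcases List.mem_cons.1 hx with h | h
      · exact List.mem_cons.2 (Or.inl h)
      · exact List.mem_cons.2 (Or.inr (htl x h))
    have := (List.subperm_of_subset hnd hsub).length_le
    simpa using this

theorem pvLastBag_getLast? (p : List String) (hne : p ≠ []) :
    p.getLast? = some (pvLastBag p) := by
  rcases List.eq_nil_or_concat p with rfl | ⟨q, x, rfl⟩
  · exact absurd rfl hne
  · rw [List.concat_eq_append, pvLastBag_append, List.getLast?_concat]

-- no reachable cycle ⇒ a path from the target never revisits a bag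
theorem pvNoRevisit (source : List (String × List (String × Int))) (target : String)
    (hacy : ∀ k ∈ source.map Prod.fst,
      pvReach source (source.length + 1) target k = true →
      pvReach source (source.length + 1) k k = false)
    {p : List String} {o : String} (hinv : pvInv source target p)
    (ho : o ∈ pvSuccs source (pvLastBag p)) : o ∉ p := by
  intro hmem
  obtain ⟨pr, hpr, rfl, _⟩ := mem_pvSuccs source ho
  have hkey : pr.1 ∈ source.map Prod.fst := List.mem_map.2 ⟨pr, hpr, rfl⟩
  have hlenp : p.length ≤ source.length + 1 := pvLen source target hinv
  obtain ⟨u, v, hp⟩ := List.append_of_mem hmem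
  -- revisiting closes a containment cycle through pr.1 of ≤ p.length steps
  have hcyc : pvReach source (source.length + 1) pr.1 pr.1 = true := by
    rcases List.eq_nil_or_concat v with rfl | ⟨w, x, rfl⟩
    · -- o is the last bag itself: a 1-step cycle
      have hlast : pvLastBag p = pr.1 := by rw [hp]; exact pvLastBag_append u pr.1
      rw [hlast] at ho
      have h1 : pvReach source 1 pr.1 pr.1 = true := by
        unfold pvReach
        exact Bool.or_eq_true_iff.2 (Or.inl (List.contains_iff_mem.2 ho))
      exact pvReach_mono source (by omega) h1
    · -- o …→ last bag → o
      rw [List.concat_eq_append] at hp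
      have hlast : pvLastBag p = x := by
        rw [hp, show u ++ pr.1 :: (w ++ [x]) = (u ++ pr.1 :: w) ++ [x] by simp]
        exact pvLastBag_append _ x
      rw [hlast] at ho
      have hchain : List.IsChain (fun a b => b ∈ pvSuccs source a) (pr.1 :: (w ++ [x])) := by
        have := hinv.2.2.1
        rw [hp] at this
        exact (List.isChain_split.1 this).2
      have hr : pvReach source (w.length + 1) pr.1 x = true :=
        pvReach_of_chain source w pr.1 x hchain
      have hlen2 : w.length + 2 ≤ p.length := by
        rw [hp]
        simp [List.length_append]
      exact pvReach_mono source (by omega) (pvReach_snoc source hr ho)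
  -- and pr.1 is upward-reachable from the target along the path's prefix
  have hreach : pvReach source (source.length + 1) target pr.1 = true := by
    match u, hp with
    | [], hp =>
      have : pr.1 = target := by
        have := hinv.2.1
        rw [hp] at this
        simpa using this
      rw [this] at hcyc ⊢
      exact hcyc
    | u0 :: u', hp =>
      have hu0 : u0 = target := by
        have := hinv.2.1
        rw [hp] at this
        simpa using this
      have hchain : List.IsChain (fun a b => b ∈ pvSuccs source a) (u0 :: (u' ++ [pr.1])) := by
        have := hinv.2.2.1
        rw [hp] at this
        have h1 := (List.isChain_split.1 this).1
        simpa using h1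
      have hr : pvReach source (u'.length + 1) u0 pr.1 = true :=
        pvReach_of_chain source u' u0 pr.1 hchain
      have hlen2 : u'.length + 2 ≤ p.length := by
        rw [hp]
        simp [List.length_append]
      rw [← hu0]
      exact pvReach_mono source (by omega) hr
  exact absurd hcyc (by simp [hacy pr.1 hkey hreach])

theorem pvInv_ext (source : List (String × List (String × Int))) (target : String)
    (hacy : ∀ k ∈ source.map Prod.fst,
      pvReach source (source.length + 1) target k = true →
      pvReach source (source.length + 1) k k = false)
    {p : List String} {o : String} (hinv : pvInv source target p)
    (ho : o ∈ pvSuccs source (pvLastBag p)) : pvInv source target (p ++ [o]) := by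
  obtain ⟨hne, hh, hch, hnd, htl⟩ := hinv
  refine ⟨by simp, ?_, ?_, ?_, ?_⟩
  · match p, hh with
    | a :: tl, hh => simpa using hh
  · refine hch.append (List.isChain_singleton _) ?_
    intro y hy z hz
    rw [pvLastBag_getLast? p hne] at hy
    have hy' : pvLastBag p = y := by simpa using hy
    have hz' : o = z := by simpa using hz
    rw [← hy', ← hz']; exact ho
  · rw [← List.concat_eq_append]
    exact hnd.concat (pvNoRevisit source target hacy ⟨hne, hh, hch, hnd, htl⟩ ho)
  · match p, hh with
    | a :: tl, _ =>
      intro x hx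
      have hx' : x ∈ tl ++ [o] := by simpa using hx
      rcases List.mem_append.1 hx' with h | h
      · exact htl x h
      · have : x = o := List.mem_singleton.1 h
        subst this
        exact pvSuccs_mem_keys source ho

-- ----- B's reverse map stores exactly pvSuccs -----

theorem pvInnerBuild_getD (ks : List String) (o b : String)
    (d : PySem.Dict String (List String)) :
    (ks.foldl (fun d bag => d.modify bag [] (· ++ [o])) d).getD b [] =
      d.getD b [] ++ List.replicate (ks.count b) o := by
  induction ks generalizing d with
  | nil => simp
  | cons k t ih =>
    simp only [List.foldl_cons]
    rw [ih, PySem.Dict.getD_modify]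
    by_cases h : b = k
    · subst h
      rw [if_pos rfl, List.count_cons_self, List.replicate_succ]
      simp
    · rw [if_neg h, List.count_cons_of_ne (Ne.symm h)]

theorem pvParents_build_getD (source : List (String × List (String × Int))) (b : String)
    (d : PySem.Dict String (List String)) :
    (source.foldl (fun d pr =>
        (PySem.List.dedup (pr.2.map Prod.fst)).foldl
          (fun d bag => d.modify bag [] (· ++ [pr.1])) d) d).getD b [] =
      d.getD b [] ++ pvSuccs source b := by
  induction source generalizing d with
  | nil => simp [pvSuccs]
  | cons pr t ih =>
    simp only [List.foldl_cons]
    rw [ih, pvInnerBuild_getD]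
    have hcnt : List.replicate ((PySem.List.dedup (pr.2.map Prod.fst)).count b) pr.1 =
        if (pr.2.map Prod.fst).contains b then [pr.1] else [] := by
      by_cases hm : b ∈ pr.2.map Prod.fst
      · rw [if_pos (List.contains_iff_mem.2 hm)]
        have h1 : b ∈ PySem.List.dedup (pr.2.map Prod.fst) := by
          rw [PySem.List.mem_dedup]; exact hm
        rw [List.count_eq_one_of_mem (PySem.List.nodup_dedup _) h1]
        rfl
      · rw [if_neg (by simpa using hm)]
        have h1 : b ∉ PySem.List.dedup (pr.2.map Prod.fst) := by
          rw [PySem.List.mem_dedup]; exact hm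
        rw [List.count_eq_zero_of_not_mem h1]
        rfl
    rw [hcnt]
    have hsucc : pvSuccs (pr :: t) b =
        (if (pr.2.map Prod.fst).contains b then [pr.1] else []) ++ pvSuccs t b := by
      unfold pvSuccs
      rw [List.filter_cons]
      split_ifs with h <;> simp
    rw [hsucc, List.append_assoc]

theorem pvParents_getD (source : List (String × List (String × Int))) (b : String) :
    (pvParents source).getD b [] = pvSuccs source b := by
  unfold pvParents
  rw [pvParents_build_getD]
  simp

-- ----- one round of A in closed form -----

theorem pvInnerScanA_eq (source : List (String × List (String × Int))) (p : List String)
    (lb : String) (acc : List (List String)) (fd ad : Bool) :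
    pvInnerScanA source p lb (acc, fd, ad) =
      (acc ++ (pvSuccs source lb).map (fun o => p ++ [o]),
       fd || !(pvSuccs source lb).isEmpty, ad || !(pvSuccs source lb).isEmpty) := by
  induction source generalizing acc fd ad with
  | nil => simp [pvInnerScanA, pvSuccs]
  | cons pr t ih =>
    have hsucc : pvSuccs (pr :: t) lb =
        (if (pr.2.map Prod.fst).contains lb then [pr.1] else []) ++ pvSuccs t lb := by
      unfold pvSuccs
      rw [List.filter_cons]
      split_ifs with h <;> simp
    show (pr :: t).foldl _ _ = _
    rw [List.foldl_cons]
    by_cases h : (pr.2.map Prod.fst).contains lb = true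
    · have hstep : (if (pr.2.map Prod.fst).contains lb = true then
          ((acc, fd, ad).1 ++ [p ++ [pr.1]], true, true) else (acc, fd, ad)) =
          (acc ++ [p ++ [pr.1]], true, true) := by rw [if_pos h]
      rw [hstep]
      have := ih (acc := acc ++ [p ++ [pr.1]]) (fd := true) (ad := true)
      rw [show (t.foldl (fun st pr =>
          if (pr.2.map Prod.fst).contains lb = true then
            (st.1 ++ [p ++ [pr.1]], true, true) else st)
          (acc ++ [p ++ [pr.1]], true, true)) =
          pvInnerScanA t p lb (acc ++ [p ++ [pr.1]], true, true) from rfl, this]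
      rw [hsucc, if_pos h]
      simp
    · have hstep : (if (pr.2.map Prod.fst).contains lb = true then
          ((acc, fd, ad).1 ++ [p ++ [pr.1]], true, true) else (acc, fd, ad)) =
          (acc, fd, ad) := by rw [if_neg h]
      rw [hstep]
      rw [show (t.foldl (fun st pr =>
          if (pr.2.map Prod.fst).contains lb = true then
            (st.1 ++ [p ++ [pr.1]], true, true) else st)
          (acc, fd, ad)) = pvInnerScanA t p lb (acc, fd, ad) from rfl, ih]
      rw [hsucc, if_neg h]
      simp

-- per-path contribution of one round of A
def pvExpand (source : List (String × List (String × Int))) (p : List String) : List (List String) :=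
  if (pvSuccs source (pvLastBag p)).isEmpty then [p]
  else (pvSuccs source (pvLastBag p)).map (fun o => p ++ [o])

theorem pvStepA_fold (source : List (String × List (String × Int))) (L : List (List String))
    (acc : List (List String)) (b : Bool) :
    L.foldl (fun acc bag_list =>
      let st := pvInnerScanA source bag_list (pvLastBag bag_list) (acc.1, false, acc.2)
      (if st.2.1 = false then st.1 ++ [bag_list] else st.1, st.2.2)) (acc, b) =
      (acc ++ L.flatMap (pvExpand source),
       b || L.any (fun p => !(pvSuccs source (pvLastBag p)).isEmpty)) := by
  induction L generalizing acc b with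
  | nil => simp
  | cons p t ih =>
    rw [List.foldl_cons]
    have hstep : (let st := pvInnerScanA source p (pvLastBag p) ((acc, b).1, false, (acc, b).2)
        ((if st.2.1 = false then st.1 ++ [p] else st.1, st.2.2) :
          List (List String) × Bool)) =
        (acc ++ pvExpand source p, b || !(pvSuccs source (pvLastBag p)).isEmpty) := by
      show (let st := pvInnerScanA source p (pvLastBag p) (acc, false, b)
        ((if st.2.1 = false then st.1 ++ [p] else st.1, st.2.2) :
          List (List String) × Bool)) = _
      rw [pvInnerScanA_eq]
      by_cases h : (pvSuccs source (pvLastBag p)).isEmpty = true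
      · have h0 : pvSuccs source (pvLastBag p) = [] := List.isEmpty_iff.1 h
        have he : pvExpand source p = [p] := by unfold pvExpand; rw [if_pos h]
        simp [h0, he]
      · have h1 : (!(pvSuccs source (pvLastBag p)).isEmpty) = true := by
          simpa using h
        have he : pvExpand source p =
            (pvSuccs source (pvLastBag p)).map (fun o => p ++ [o]) := by
          unfold pvExpand; rw [if_neg h]
        simp [h1, he]
    rw [hstep, ih]
    simp [List.flatMap_cons, List.any_cons, List.append_assoc, Bool.or_assoc]

theorem pvStepA_eq (source : List (String × List (String × Int))) (L : List (List String)) :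
    pvStepA source L =
      (L.flatMap (pvExpand source),
       L.any (fun p => !(pvSuccs source (pvLastBag p)).isEmpty)) := by
  unfold pvStepA
  rw [pvStepA_fold]
  simp

-- ----- B's DFS is fuel-independent once the fuel covers the remaining headroom -----

theorem pvDfs_stable (source : List (String × List (String × Int))) (target : String)
    (hacy : ∀ k ∈ source.map Prod.fst,
      pvReach source (source.length + 1) target k = true →
      pvReach source (source.length + 1) k k = false) :
    ∀ (f g : Nat) (p : List String), pvInv source target p →
      source.length + 2 - p.length ≤ f →
      source.length + 2 - p.length ≤ g →
      pvDfs (pvParents source) f p = pvDfs (pvParents source) g p := by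
  intro f
  induction f with
  | zero =>
    intro g p hinv hf _
    have := pvLen source target hinv
    omega
  | succ f ih =>
    intro g p hinv hf hg
    match g with
    | 0 =>
      have := pvLen source target hinv
      omega
    | g + 1 =>
      show pvDfs _ (f + 1) p = pvDfs _ (g + 1) p
      unfold pvDfs
      rw [pvParents_getD]
      by_cases h : (pvSuccs source (pvLastBag p)).isEmpty = true
      · simp only [h, if_pos]
      · simp only [h]
        rw [PySem.List.foldl_append_eq_flatMap, PySem.List.foldl_append_eq_flatMap]
        simp only [List.nil_append]
        apply List.flatMap_congr
        intro o hoo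
        have hinv' := pvInv_ext source target hacy hinv hoo
        have hlen : (p ++ [o]).length = p.length + 1 := by simp
        exact ih g (p ++ [o]) hinv' (by omega) (by omega)

-- ----- A's whole while-loop is a DFS of each of its paths -----

theorem pvLoopA_eq_dfs (source : List (String × List (String × Int))) (target : String)
    (hacy : ∀ k ∈ source.map Prod.fst,
      pvReach source (source.length + 1) target k = true →
      pvReach source (source.length + 1) k k = false) :
    ∀ (f : Nat) (L : List (List String)),
      (∀ p ∈ L, pvInv source target p) →
      (∀ p ∈ L, ¬ (pvSuccs source (pvLastBag p)).isEmpty = true →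
        source.length + 1 - p.length < f) →
      pvLoopA source f L = L.flatMap (pvDfs (pvParents source) (source.length + 1)) := by
  intro f
  induction f with
  | zero =>
    intro L hinvL hfuel
    have hall : ∀ p ∈ L, (pvSuccs source (pvLastBag p)).isEmpty = true := by
      intro p hp
      by_contra hne
      exact absurd (hfuel p hp hne) (by omega)
    show L = _
    rw [List.flatMap_congr (g := fun p => [p]) ?_, List.flatMap_singleton']
    intro p hp
    show pvDfs _ (source.length + 1) p = [p]
    unfold pvDfs
    rw [pvParents_getD, if_pos (hall p hp)]
  | succ f ih =>
    intro L hinvL hfuel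
    show (let st := pvStepA source L
          let L' := if st.1.isEmpty then L else st.1
          if st.2 then pvLoopA source f L' else L') = _
    rw [pvStepA_eq]
    by_cases hany : L.any (fun p => !(pvSuccs source (pvLastBag p)).isEmpty) = true
    · simp only [hany, if_pos]
      have hne : (L.flatMap (pvExpand source)).isEmpty = false := by
        obtain ⟨p, hp, hext⟩ := List.any_eq_true.1 hany
        have : pvExpand source p ≠ [] := by
          unfold pvExpand
          rw [if_neg (by simpa using hext)]
          intro hmap
          rw [List.map_eq_nil_iff] at hmap
          rw [hmap] at hext
          simp at hext
        rw [List.isEmpty_eq_false_iff, Ne, List.flatMap_eq_nil_iff]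
        intro hall
        exact this (hall p hp)
      simp only [hne]
      rw [if_neg (by simp)]
      rw [ih (L.flatMap (pvExpand source)) ?inv ?fuel]
      case inv =>
        intro q hq
        obtain ⟨p, hp, hq⟩ := List.mem_flatMap.1 hq
        unfold pvExpand at hq
        by_cases hpe : (pvSuccs source (pvLastBag p)).isEmpty = true
        · rw [if_pos hpe] at hq
          have : q = p := by simpa using hq
          rw [this]
          exact hinvL p hp
        · rw [if_neg hpe] at hq
          obtain ⟨o, hoo, rfl⟩ := List.mem_map.1 hq
          exact pvInv_ext source target hacy (hinvL p hp) hoo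
      case fuel =>
        intro q hq hqe
        obtain ⟨p, hp, hq⟩ := List.mem_flatMap.1 hq
        unfold pvExpand at hq
        by_cases hpe : (pvSuccs source (pvLastBag p)).isEmpty = true
        · rw [if_pos hpe] at hq
          have : q = p := by simpa using hq
          subst this
          exact absurd hpe hqe
        · rw [if_neg hpe] at hq
          obtain ⟨o, hoo, rfl⟩ := List.mem_map.1 hq
          have h3 := hfuel p hp (by simpa using hpe)
          have h4 := pvLen source target (pvInv_ext source target hacy (hinvL p hp) hoo)
          have hlen : (p ++ [o]).length = p.length + 1 := by simp
          omega
      · rw [List.flatMap_assoc]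
        apply List.flatMap_congr
        intro p hp
        unfold pvExpand
        by_cases hpe : (pvSuccs source (pvLastBag p)).isEmpty = true
        · rw [if_pos hpe, List.flatMap_singleton]
        · rw [if_neg hpe, List.flatMap_map]
          show _ = pvDfs (pvParents source) (source.length + 1) p
          unfold pvDfs
          rw [pvParents_getD]
          simp only [hpe]
          rw [PySem.List.foldl_append_eq_flatMap, List.nil_append]
          apply List.flatMap_congr
          intro o hoo
          have hinvp := hinvL p hp
          have hinv' := pvInv_ext source target hacy hinvp hoo
          have hplen : 1 ≤ p.length := List.length_pos_of_ne_nil hinvp.1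
          have hlen : (p ++ [o]).length = p.length + 1 := by simp
          exact pvDfs_stable source target hacy (source.length + 1) source.length
            (p ++ [o]) hinv' (by omega) (by omega)
    · have hany' : L.any (fun p => !(pvSuccs source (pvLastBag p)).isEmpty) = false := by
        simpa using hany
      simp only [hany']
      have hall : ∀ p ∈ L, (pvSuccs source (pvLastBag p)).isEmpty = true := by
        intro p hp
        have := List.any_eq_false.1 hany' p hp
        simpa using this
      have hfl : L.flatMap (pvExpand source) = L := by
        rw [List.flatMap_congr (g := fun p => [p]) ?_, List.flatMap_singleton']
        intro p hp
        unfold pvExpand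
        rw [if_pos (hall p hp)]
      rw [hfl]
      rw [if_neg (by simp)]
      rw [ite_self]
      rw [List.flatMap_congr (g := fun p => [p]) ?_, List.flatMap_singleton']
      intro p hp
      show pvDfs _ (source.length + 1) p = [p]
      unfold pvDfs
      rw [pvParents_getD, if_pos (hall p hp)]

theorem pvLastBag_single (x : String) : pvLastBag [x] = x := pvLastBag_append [] x

-- ===== VERDICT (by name: the statement is the Claim_ definition above) =====
theorem build_dependencies_up_spec : Claim_equal_build_dependencies_up := by
  intro source target _hdom hpre
  obtain ⟨_hnodup, hacy⟩ := hpre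
  show build_dependencies_up source target = build_dependencies_up_alt source target
  unfold build_dependencies_up build_dependencies_up_alt
  rw [PySem.List.foldl_append_if
    (p := fun pr : String × List (String × Int) => (pr.2.map Prod.fst).contains target)
    (f := fun pr : String × List (String × Int) => [target, pr.1])]
  rw [List.nil_append]
  rw [pvLoopA_eq_dfs source target hacy (source.length + 1) _ ?inv ?fuel]
  case inv =>
    intro p hp
    obtain ⟨pr, hpr, rfl⟩ := List.mem_map.1 hp
    have ho : pr.1 ∈ pvSuccs source target := by
      unfold pvSuccs
      exact List.mem_map.2 ⟨pr, List.mem_filter.2 ⟨(List.mem_filter.1 hpr).1,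
        (List.mem_filter.1 hpr).2⟩, rfl⟩
    have := pvInv_ext source target hacy (pvInv_init source target)
      (by rw [pvLastBag_single]; exact ho)
    simpa using this
  case fuel =>
    intro p hp _
    obtain ⟨pr, _, rfl⟩ := List.mem_map.1 hp
    simp
  show _ = ((pvParents source).getD target []).foldl
    (fun acc o => acc ++ pvDfs (pvParents source) (source.length + 1) [target, o]) []
  rw [pvParents_getD, PySem.List.foldl_append_eq_flatMap, List.nil_append]
  unfold pvSuccs
  rw [List.flatMap_map, List.flatMap_map]
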